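-- pv_equiv track=rewrite | github.com/bio-ontology-research-group/hapli | hapli/diploid_analyzer.py | _determine_worst_impact
-- ===== SOURCE A (Python) =====
-- from typing import Dict, List, Optional, Set, Tuple, Any, Union
--
-- def _determine_worst_impact(impact_types: List[str]) -> str:
--     """Determine the worst (most severe) impact type."""
--     if not impact_types:
--         return 'MISSING'
--
--     # Severity order (most to least severe)
--     severity_order = ['MISSING', 'SPLIT', 'TRUNCATED', 'INTACT']
--
--     for impact in severity_order:
--         if impact in impact_types:
--             return impact
--
--     return impact_types[0]  # Fallback
-- ===== SOURCE B (Python) =====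
-- def _determine_worst_impact(impact_types):
--     """Determine the worst (most severe) impact type."""
--     if not impact_types:
--         return 'MISSING'
--
--     rank = {'MISSING': 0, 'SPLIT': 1, 'TRUNCATED': 2, 'INTACT': 3}
--
--     best = None  # (impact, rank) with the smallest rank seen so far
--     for impact in impact_types:
--         r = rank.get(impact)
--         if r is not None and (best is None or r < best[1]):
--             best = (impact, r)
--
--     return best[0] if best is not None else impact_types[0]
-- ===== Notes on version B (the rewrite author's own statement) =====
-- stated objective: idiomatic
-- what changed: Replaces A's probe of a fixed 4-element priority list with repeated 'in' scans of the input by a single pass over the input that keeps a running minimum of severity ranks from a rank dict, falling back to the first element when nothing is recognized.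
import Mathlib
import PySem

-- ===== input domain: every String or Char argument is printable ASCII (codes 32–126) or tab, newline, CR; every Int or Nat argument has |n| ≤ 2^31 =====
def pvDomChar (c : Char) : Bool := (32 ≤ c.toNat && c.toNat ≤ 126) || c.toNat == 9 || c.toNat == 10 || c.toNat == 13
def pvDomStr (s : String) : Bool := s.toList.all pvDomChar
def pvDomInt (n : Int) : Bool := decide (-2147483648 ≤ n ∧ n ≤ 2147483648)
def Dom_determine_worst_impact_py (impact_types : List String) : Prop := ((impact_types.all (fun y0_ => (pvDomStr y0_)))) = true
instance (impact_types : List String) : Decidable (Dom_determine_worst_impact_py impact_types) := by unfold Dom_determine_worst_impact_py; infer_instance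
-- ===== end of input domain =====

-- B replaces A's probe of a fixed priority list (membership scan per severity) by one pass over the
-- input keeping a running minimum of severity ranks from a rank dict; same result, idiomatic single scan.
-- ===== PORT A =====
-- the 'for impact in severity_order: if impact in impact_types: return impact' loop
def pvProbeSeverity (severity : List String) (impact_types : List String) (fallback : String) : String :=
  match severity with
  | [] => fallback  -- loop fell through: return impact_types[0] (nonempty at the call site)
  | s :: rest => if s ∈ impact_types then s else pvProbeSeverity rest impact_types fallback

def determine_worst_impact_py (impact_types : List String) : String :=
  match impact_types with
  | [] => "MISSING"
  | x :: _ => pvProbeSeverity ["MISSING", "SPLIT", "TRUNCATED", "INTACT"] impact_types x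

-- ===== PORT B =====
def pvRankDict : PySem.Dict String Int :=
  PySem.Dict.ofList [("MISSING", 0), ("SPLIT", 1), ("TRUNCATED", 2), ("INTACT", 3)]

-- one iteration of B's loop: keep the (impact, rank) pair with the smallest rank seen so far
def pvStep (best : Option (String × Int)) (impact : String) : Option (String × Int) :=
  match pvRankDict.get? impact with
  | none => best
  | some r =>
    match best with
    | none => some (impact, r)
    | some b => if r < b.2 then some (impact, r) else best

def determine_worst_impact_py_alt (impact_types : List String) : String :=
  match impact_types with
  | [] => "MISSING"
  | x :: _ =>
    match impact_types.foldl pvStep none with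
    | some b => b.1
    | none => x

-- ===== PRECONDITION & SPEC =====
def Spec_determine_worst_impact_py (impact_types : List String) (out : String) : Prop := out = determine_worst_impact_py_alt impact_types
instance (impact_types : List String) (out : String) : Decidable (Spec_determine_worst_impact_py impact_types out) := by unfold Spec_determine_worst_impact_py; infer_instance

-- ===== CLAIM (what is proved, stated in full; the proofs are below) =====
def Claim_equal_determine_worst_impact_py : Prop := ∀ (impact_types : List String), Dom_determine_worst_impact_py impact_types → Spec_determine_worst_impact_py impact_types (determine_worst_impact_py impact_types)

-- ===== LEMMAS AND PROOFS =====

-- ===== VERDICT (by name: the statement is the Claim_ definition above) =====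
-- merge two loop states, preferring the left one on rank ties (as B's strict '<' does)
def pvMerge (a b : Option (String × Int)) : Option (String × Int) :=
  match b with
  | none => a
  | some q =>
    match a with
    | none => some q
    | some p => if q.2 < p.2 then some q else a

theorem pvRank_get (x : String) :
    pvRankDict.get? x =
      if "MISSING" = x then some (0 : Int)
      else if "SPLIT" = x then some 1
      else if "TRUNCATED" = x then some 2
      else if "INTACT" = x then some 3 else none := by
  have h : pvRankDict =
      PySem.Dict.mk [("MISSING", (0 : Int)), ("SPLIT", 1), ("TRUNCATED", 2), ("INTACT", 3)] := by
    decide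
  rw [h]
  by_cases h0 : "MISSING" = x
  · subst h0; decide
  by_cases h1 : "SPLIT" = x
  · subst h1; decide
  by_cases h2 : "TRUNCATED" = x
  · subst h2; decide
  by_cases h3 : "INTACT" = x
  · subst h3; decide
  simp [PySem.Dict.get?, beq_iff_eq, h0, h1, h2, h3]

theorem pvStep_eq_merge (best : Option (String × Int)) (impact : String) :
    pvStep best impact = pvMerge best (pvStep none impact) := by
  unfold pvStep pvMerge
  cases pvRankDict.get? impact <;> cases best <;> simp

theorem pvMerge_assoc (a b c : Option (String × Int)) :
    pvMerge (pvMerge a b) c = pvMerge a (pvMerge b c) := by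
  rcases a with _ | ⟨pa, ra⟩ <;> rcases b with _ | ⟨pb, rb⟩ <;> rcases c with _ | ⟨pc, rc⟩ <;>
    (try simp only [pvMerge]) <;>
    (repeat first | rfl | (exfalso; omega) | split_ifs | simp only [pvMerge])

theorem pvFold_merge (xs : List String) (acc : Option (String × Int)) :
    xs.foldl pvStep acc = pvMerge acc (xs.foldl pvStep none) := by
  induction xs generalizing acc with
  | nil => simp [pvMerge]
  | cons x xs ih =>
    simp only [List.foldl_cons]
    rw [ih (pvStep acc x), ih (pvStep none x), pvStep_eq_merge acc x, pvMerge_assoc]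

-- B's fold result as a function of which severities occur in the list
def pvBest (xs : List String) : Option (String × Int) :=
  if "MISSING" ∈ xs then some ("MISSING", 0)
  else if "SPLIT" ∈ xs then some ("SPLIT", 1)
  else if "TRUNCATED" ∈ xs then some ("TRUNCATED", 2)
  else if "INTACT" ∈ xs then some ("INTACT", 3)
  else none

theorem pvBest_cons (x : String) (xs : List String) :
    pvBest (x :: xs) = pvMerge (pvStep none x) (pvBest xs) := by
  have hmn : ∀ b : Option (String × Int), pvMerge none b = b := by
    intro b; cases b <;> rfl
  unfold pvStep
  rw [pvRank_get x]
  by_cases h0 : "MISSING" = x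
  · subst h0
    unfold pvBest pvMerge
    simp only [List.mem_cons, true_or, if_true]
    split_ifs <;> rfl
  by_cases h1 : "SPLIT" = x
  · subst h1
    unfold pvBest pvMerge
    simp [List.mem_cons]
    split_ifs <;> rfl
  by_cases h2 : "TRUNCATED" = x
  · subst h2
    unfold pvBest pvMerge
    simp [List.mem_cons]
    split_ifs <;> rfl
  by_cases h3 : "INTACT" = x
  · subst h3
    unfold pvBest pvMerge
    simp [List.mem_cons]
    split_ifs <;> rfl
  simp only [if_neg h0, if_neg h1, if_neg h2, if_neg h3, hmn]
  unfold pvBest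
  simp [List.mem_cons, h0, h1, h2, h3]

theorem pvFold_eq_best (xs : List String) : xs.foldl pvStep none = pvBest xs := by
  induction xs with
  | nil => simp [pvBest]
  | cons x xs ih =>
    rw [List.foldl_cons, pvFold_merge, ih, pvBest_cons]

theorem determine_worst_impact_py_spec : Claim_equal_determine_worst_impact_py := by
  intro xs _
  unfold Spec_determine_worst_impact_py determine_worst_impact_py determine_worst_impact_py_alt
  cases xs with
  | nil => rfl
  | cons x rest =>
    rw [pvFold_eq_best]
    unfold pvBest pvProbeSeverity
    by_cases h0 : "MISSING" ∈ x :: rest <;>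
      by_cases h1 : "SPLIT" ∈ x :: rest <;>
        by_cases h2 : "TRUNCATED" ∈ x :: rest <;>
          by_cases h3 : "INTACT" ∈ x :: rest <;>
            simp [h0, h1, h2, h3, pvProbeSeverity]
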